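-- pv_equiv track=rewrite | github.com/j-mroz/Algorithms-leetcode | codility/lessons/90_indeed_prime_2015/slalom_skiing.py | solution
-- ===== SOURCE A (Python) =====
-- class BinaryIndexedTree:
--     def __init__(self, size):
--         self.nodes = [0] * (size + 1)
--
--     def set_max(self, index, val):
--         index += 1
--         while index < len(self.nodes):
--             self.nodes[index] = max(self.nodes[index], val)
--             index += self.lsb(index)
--
--     def query_max(self, index):
--         result = 0
--         index += 1
--         while index > 0:
--             result = max(result, self.nodes[index])
--             index -= self.lsb(index)
--         return result
--
--     def lsb(self, index):
--         return index & (-index)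
--
-- def compress_values(arr):
--     vi_arr = sorted((val,i) for i,val in enumerate(arr))
--     inv_arr = ((i,new_val) for new_val,(val,i) in enumerate(vi_arr))
--     compressed = [new_val for i,new_val in sorted(inv_arr)]
--     return compressed
--
-- def solution(A):
--     A = compress_values(A)
--     max_a = max(A)
--
--     dp = [[-1 for _ in A] for _ in range(3)]
--     bit = [BinaryIndexedTree(max(A)) for _ in range(3)]
--
--     for i in range(len(A)):
--         longest = bit[0].query_max(A[i]-1) + 1
--         bit[0].set_max(A[i], longest)
--         dp[0][i] = longest
--
--     for i in range(len(A)):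
--         longest = max(dp[0][i], bit[1].query_max(max_a-A[i]-1) + 1)
--         bit[1].set_max(max_a-A[i], longest)
--         dp[1][i] = longest
--
--     for i in range(len(A)):
--         longest = max(dp[1][i], bit[2].query_max(A[i]-1) + 1)
--         bit[2].set_max(A[i], longest)
--         dp[2][i] = longest
--
--     return max(max(dp[2]), max(dp[1]), max(dp[0]))
-- ===== SOURCE B (Python) =====
-- def solution(A):
--     # O(n^2) DP, no coordinate compression and no Fenwick trees.
--     # For j < i, "gate j is below gate i" under A's compressed ranks is exactly A[j] <= A[i]
--     # (ties are broken by index), and "above" is exactly A[j] > A[i].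
--     dp = []  # (d0, d1, d2) per gate: best run ending here with 0/<=1/<=2 direction changes
--     for a in A:
--         b0 = b1 = b2 = 0
--         for (d0, d1, d2), aj in zip(dp, A):
--             if aj <= a:
--                 b0 = max(b0, d0)
--                 b2 = max(b2, d2)
--             else:
--                 b1 = max(b1, d1)
--         d0 = b0 + 1
--         d1 = max(d0, b1 + 1)
--         d2 = max(d1, b2 + 1)
--         dp.append((d0, d1, d2))
--     return max(d2 for _, _, d2 in dp)
-- ===== Notes on version B (the rewrite author's own statement) =====
-- stated objective: simpler
-- what changed: Replaced coordinate compression plus three Fenwick max-trees by a direct one-pass quadratic DP over the raw values, using the tie-break 'A[j] <= A[i] for j < i' in place of compressed ranks; Pre_ excludes only the empty list, on which both A and B raise ValueError (max of empty sequence).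
import Mathlib
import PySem

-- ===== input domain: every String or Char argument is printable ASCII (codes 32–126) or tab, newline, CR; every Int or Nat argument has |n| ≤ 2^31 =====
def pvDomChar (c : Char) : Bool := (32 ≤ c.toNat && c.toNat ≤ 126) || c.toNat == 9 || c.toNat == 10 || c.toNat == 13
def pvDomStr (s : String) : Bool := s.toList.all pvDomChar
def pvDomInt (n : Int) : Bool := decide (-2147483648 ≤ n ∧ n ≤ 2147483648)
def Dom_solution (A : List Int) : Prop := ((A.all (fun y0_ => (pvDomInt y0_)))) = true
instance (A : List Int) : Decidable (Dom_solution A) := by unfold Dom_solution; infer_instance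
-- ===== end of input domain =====

-- B replaces A's coordinate compression + three Fenwick max-trees by a direct quadratic
-- one-pass DP over the raw values (objective: simpler; B is not faster).

-- ===== PORT A =====

-- lsb(index) = index & (-index)
def pyLsb (k : Int) : Int := PySem.Int.band k (-k)

-- Nat view of the lowest set bit, used for the termination measures below
def lsbN (k : Nat) : Nat := k - (k &&& (k - 1))

theorem lsbN_pos {k : Nat} (h : 0 < k) : 0 < lsbN k := by
  have h1 : k &&& (k - 1) ≤ k - 1 := Nat.and_le_right
  unfold lsbN; omega

theorem pyLsb_eq (k : Int) (h : 0 < k) : pyLsb k = ((lsbN k.toNat : Nat) : Int) := by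
  unfold pyLsb PySem.Int.band lsbN
  have h0 : 0 ≤ k := le_of_lt h
  have h1 : ¬ (0 ≤ -k) := by omega
  simp only [h0, if_pos, h1, if_neg, if_true, if_false]
  have : (-(-k) - 1).toNat = k.toNat - 1 := by omega
  rw [this]

theorem pyLsb_pos (k : Int) (h : 0 < k) : 0 < pyLsb k := by
  rw [pyLsb_eq k h]
  exact_mod_cast lsbN_pos (by omega)

theorem pyLsb_le (k : Int) (h : 0 < k) : pyLsb k ≤ k := by
  rw [pyLsb_eq k h]
  have : lsbN k.toNat ≤ k.toNat := Nat.sub_le _ _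
  omega

-- while index < len(nodes): nodes[index] = max(nodes[index], val); index += lsb(index)
-- ('0 < index' is a pure totality guard: entering the Python loop with index ≤ 0 diverges)
def bitSetGo (nodes : List Int) (index val : Int) : List Int :=
  if h : 0 < index ∧ index < (nodes.length : Int) then
    bitSetGo (nodes.set index.toNat (max (nodes.getD index.toNat 0) val)) (index + pyLsb index) val
  else nodes
termination_by ((nodes.length : Int) - index).toNat
decreasing_by
  have hp := pyLsb_pos index h.1
  simp only [List.length_set]
  omega

-- set_max(self, index, val)
def bitSetMax (nodes : List Int) (index val : Int) : List Int := bitSetGo nodes (index + 1) val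

-- while index > 0: result = max(result, nodes[index]); index -= lsb(index)
def bitQueryGo (nodes : List Int) (index result : Int) : Int :=
  if h : 0 < index then
    bitQueryGo nodes (index - pyLsb index) (max result (nodes.getD index.toNat 0))
  else result
termination_by index.toNat
decreasing_by
  have hp := pyLsb_pos index h
  have hl := pyLsb_le index h
  omega

-- query_max(self, index)
def bitQueryMax (nodes : List Int) (index : Int) : Int := bitQueryGo nodes (index + 1) 0

-- compress_values(arr)
def compress (arr : List Int) : List Int :=
  let vi := PySem.List.sorted2 ((PySem.List.enumerate arr).map (fun p => (p.2, p.1)))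
              (fun p => p.1) (fun p => p.2)
  let inv := (PySem.List.enumerate vi).map (fun q => (q.2.2, q.1))
  (PySem.List.sorted2 inv (fun p => p.1) (fun p => p.2)).map (fun p => p.2)


-- one iteration of each of the three 'for i in range(len(A))' loops
def pass0Step (A' : List Int) (st : List Int × List Int) (i : ℕ) : List Int × List Int :=
  let a := A'.getD i 0
  let longest := bitQueryMax st.1 (a - 1) + 1
  (bitSetMax st.1 a longest, st.2.set i longest)

def pass1Step (A' : List Int) (maxA : Int) (dp0 : List Int) (st : List Int × List Int) (i : ℕ) :
    List Int × List Int :=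
  let a := A'.getD i 0
  let longest := max (dp0.getD i 0) (bitQueryMax st.1 (maxA - a - 1) + 1)
  (bitSetMax st.1 (maxA - a) longest, st.2.set i longest)

def pass2Step (A' : List Int) (dp1 : List Int) (st : List Int × List Int) (i : ℕ) :
    List Int × List Int :=
  let a := A'.getD i 0
  let longest := max (dp1.getD i 0) (bitQueryMax st.1 (a - 1) + 1)
  (bitSetMax st.1 a longest, st.2.set i longest)

def solution (A : List Int) : Int :=
  let A' := compress A
  let maxA := (PySem.List.max? A' (fun x => x)).getD 0   -- max(A): ValueError on []; Pre_ excludes []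
  let n := A'.length
  let dp0 := ((List.range n).foldl (pass0Step A')
    (List.replicate (maxA + 1).toNat 0, List.replicate n (-1))).2
  let dp1 := ((List.range n).foldl (pass1Step A' maxA dp0)
    (List.replicate (maxA + 1).toNat 0, List.replicate n (-1))).2
  let dp2 := ((List.range n).foldl (pass2Step A' dp1)
    (List.replicate (maxA + 1).toNat 0, List.replicate n (-1))).2
  max (max ((PySem.List.max? dp2 (fun x => x)).getD 0) ((PySem.List.max? dp1 (fun x => x)).getD 0))
      ((PySem.List.max? dp0 (fun x => x)).getD 0)

-- ===== PORT B =====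

-- one iteration of B's inner 'for ... in zip(dp, A)' loop
def altInner (a : Int) (b : Int × Int × Int) (p : (Int × Int × Int) × Int) : Int × Int × Int :=
  if p.2 ≤ a then (max b.1 p.1.1, b.2.1, max b.2.2 p.1.2.2)
  else (b.1, max b.2.1 p.1.2.1, b.2.2)

-- one iteration of B's outer 'for a in A' loop
def altStep (A : List Int) (dp : List (Int × Int × Int)) (a : Int) : List (Int × Int × Int) :=
  let b := (dp.zip A).foldl (altInner a) (0, 0, 0)
  let d0 := b.1 + 1
  let d1 := max d0 (b.2.1 + 1)
  let d2 := max d1 (b.2.2 + 1)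
  dp ++ [(d0, d1, d2)]

def solution_alt (A : List Int) : Int :=
  let dp := A.foldl (altStep A) []
  (PySem.List.max? (dp.map (fun t => t.2.2)) (fun x => x)).getD 0   -- max(...): ValueError on []


-- ===== PRECONDITION & SPEC =====

-- Pre_ excludes only the empty list, on which A (and B) raise ValueError (max of empty sequence).
def Pre_solution (A : List Int) : Prop := A ≠ []
instance (A : List Int) : Decidable (Pre_solution A) := by unfold Pre_solution; infer_instance

def pvWitness_solution : List Int := [3, 1, 2, 1]

def Spec_solution (A : List Int) (out : Int) : Prop := out = solution_alt A
instance (A : List Int) (out : Int) : Decidable (Spec_solution A out) := by unfold Spec_solution; infer_instance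

-- ===== CLAIM (what is proved, stated in full; the proofs are below) =====
def Claim_equal_solution : Prop := ∀ (A : List Int), Dom_solution A → Pre_solution A → Spec_solution A (solution A)

-- ===== LEMMAS AND PROOFS =====

theorem lsbN_le {k : Nat} : lsbN k ≤ k := Nat.sub_le _ _

theorem and_odd_even (j : ℕ) : (2*j+1) &&& (2*j) = 2*j := by
  apply Nat.eq_of_testBit_eq
  intro i
  rw [Nat.testBit_and]
  cases i with
  | zero =>
      have h2 : (2*j) % 2 = 0 := by omega
      simp [Nat.testBit_zero, h2]
  | succ i =>
      simp only [Nat.testBit_succ]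
      have h1 : (2*j+1)/2 = j := by omega
      have h2 : (2*j)/2 = j := by omega
      rw [h1, h2, Bool.and_self]

theorem and_even_odd (x y : ℕ) : (2*x) &&& (2*y+1) = 2*(x &&& y) := by
  apply Nat.eq_of_testBit_eq
  intro i
  rw [Nat.testBit_and]
  cases i with
  | zero =>
      have h1 : (2*x) % 2 = 0 := by omega
      have h2 : (2*(x &&& y)) % 2 = 0 := by omega
      simp [Nat.testBit_zero, h1, h2]
  | succ i =>
      simp only [Nat.testBit_succ]
      have h1 : (2*x)/2 = x := by omega
      have h2 : (2*y+1)/2 = y := by omega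
      have h3 : (2*(x &&& y))/2 = x &&& y := by omega
      rw [h1, h2, h3, Nat.testBit_and]

theorem lsbN_odd (j : ℕ) : lsbN (2*j+1) = 1 := by
  unfold lsbN
  have : 2*j+1-1 = 2*j := by omega
  rw [this, and_odd_even]
  omega

theorem lsbN_even {m : ℕ} (h : 0 < m) : lsbN (2*m) = 2 * lsbN m := by
  unfold lsbN
  have h1 : 2*m-1 = 2*(m-1)+1 := by omega
  rw [h1, and_even_odd]
  have h2 : m &&& (m-1) ≤ m - 1 := Nat.and_le_right
  omega

theorem lsbN_struct : ∀ k : ℕ, 0 < k → ∃ s, lsbN k = 2^s ∧ 2^s ∣ k := by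
  intro k
  induction k using Nat.strong_induction_on with
  | _ k ih =>
    intro hk
    rcases Nat.even_or_odd k with he | ho
    · obtain ⟨m, hm⟩ := he
      have hm' : k = 2*m := by omega
      have hmpos : 0 < m := by omega
      obtain ⟨s, hs1, hs2⟩ := ih m (by omega) hmpos
      refine ⟨s+1, by rw [hm', lsbN_even hmpos, hs1, pow_succ]; ring, ?_⟩
      rw [hm', pow_succ]
      calc (2:ℕ)^s * 2 = 2 * 2^s := by ring
        _ ∣ 2 * m := mul_dvd_mul_left 2 hs2
    · obtain ⟨j, hj⟩ := ho
      refine ⟨0, ?_, one_dvd _⟩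
      rw [pow_zero, hj, lsbN_odd j]

theorem lsbN_next : ∀ k : ℕ, 0 < k → 2 * lsbN k ≤ lsbN (k + lsbN k) := by
  intro k
  induction k using Nat.strong_induction_on with
  | _ k ih =>
    intro hk
    rcases Nat.even_or_odd k with he | ho
    · obtain ⟨m, hm⟩ := he
      have hm' : k = 2*m := by omega
      have hmpos : 0 < m := by omega
      have h1 : k + lsbN k = 2*(m + lsbN m) := by rw [hm', lsbN_even hmpos]; ring
      rw [h1, lsbN_even (by have := lsbN_pos hmpos; omega), hm', lsbN_even hmpos]
      have := ih m (by omega) hmpos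
      omega
    · obtain ⟨j, hj⟩ := ho
      have h1 : lsbN k = 1 := by rw [hj]; exact lsbN_odd j
      have h2 : k + lsbN k = 2*(j+1) := by omega
      have h3 : k + 1 = 2*(j+1) := by omega
      rw [h1, h3, lsbN_even (by omega)]
      have := lsbN_pos (k := j+1) (by omega)
      omega

-- interval covering: Cov k0 j ↔ k0 ∈ (j - lsbN j, j]
def pvCov (k0 j : ℕ) : Prop := j - lsbN j < k0 ∧ k0 ≤ j

-- chain step: the next updated node is still ≤ j whenever both intervals contain k0
theorem cov_step {k0 k j : ℕ} (hk : 0 < k) (hkj : k < j)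
    (hck : pvCov k0 k) (hcj : pvCov k0 j) : k + lsbN k ≤ j := by
  obtain ⟨s, hs1, hs2⟩ := lsbN_struct k hk
  obtain ⟨u, hu1, hu2⟩ := lsbN_struct j (by omega)
  have hjb : j - lsbN j < k := lt_of_lt_of_le hcj.1 hck.2
  have hble : lsbN j ≤ j := lsbN_le
  have hjk : j - k < lsbN j := by omega
  rcases le_total s u with hsu | hus
  · have hab : (2^s : ℕ) ∣ 2^u := pow_dvd_pow 2 hsu
    have : (2^s : ℕ) ∣ j - k := Nat.dvd_sub (hab.trans hu2) hs2
    have hpos : 0 < j - k := by omega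
    have := Nat.le_of_dvd hpos this
    omega
  · have hba : (2^u : ℕ) ∣ 2^s := pow_dvd_pow 2 hus
    have : (2^u : ℕ) ∣ j - k := Nat.dvd_sub hu2 (hba.trans hs2)
    have hpos : 0 < j - k := by omega
    have := Nat.le_of_dvd hpos this
    omega

-- nesting: the next updated node's interval still contains k0
theorem cov_next {k0 k : ℕ} (hk : 0 < k) (hck : pvCov k0 k) : pvCov k0 (k + lsbN k) := by
  have h1 := lsbN_next k hk
  have h2 : lsbN (k + lsbN k) ≤ k + lsbN k := lsbN_le
  have h3 := lsbN_pos hk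
  unfold pvCov at hck ⊢
  omega

def pvChain (len : ℕ) (k : ℕ) : List ℕ :=
  if h : 0 < k ∧ k < len then k :: pvChain len (k + lsbN k) else []
termination_by len - k
decreasing_by have := lsbN_pos h.1; omega

theorem chain_covers (len k0 k : ℕ) (hk : 0 < k) (hc : pvCov k0 k) :
    ∀ j ∈ pvChain len k, pvCov k0 j ∧ j < len := by
  rw [pvChain]
  split
  · rename_i h
    intro j hj
    rcases List.mem_cons.mp hj with rfl | hj'
    · exact ⟨hc, h.2⟩
    · exact chain_covers len k0 (k + lsbN k) (by have := lsbN_pos hk; omega) (cov_next hk hc) j hj'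
  · intro j hj; simp at hj
termination_by len - k
decreasing_by have := lsbN_pos hk; omega

theorem cov_self {k : ℕ} (hk : 0 < k) : pvCov k k := by
  unfold pvCov
  have := lsbN_pos hk
  omega

theorem chain_reaches (len k0 k j : ℕ) (hk : 0 < k) (hck : pvCov k0 k) (hcj : pvCov k0 j)
    (hkj : k ≤ j) (hjl : j < len) : j ∈ pvChain len k := by
  rw [pvChain]
  rw [dif_pos ⟨hk, by omega⟩]
  rcases eq_or_lt_of_le hkj with rfl | hlt
  · exact List.mem_cons_self
  · refine List.mem_cons_of_mem _ ?_
    have hstep := cov_step hk hlt hck hcj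
    exact chain_reaches len k0 (k + lsbN k) j (by have := lsbN_pos hk; omega) (cov_next hk hck) hcj hstep hjl
termination_by j - k
decreasing_by have := lsbN_pos hk; omega

theorem bitSetGo_length (nodes : List Int) (idx v : Int) :
    (bitSetGo nodes idx v).length = nodes.length := by
  rw [bitSetGo]
  split
  · rename_i h
    rw [bitSetGo_length]
    simp
  · rfl
termination_by ((nodes.length : Int) - idx).toNat
decreasing_by rename_i hh; have := pyLsb_pos idx hh.1; simp only [List.length_set]; omega

theorem chain_mem_ge (len k : ℕ) (hk : 0 < k) : ∀ j ∈ pvChain len k, k ≤ j :=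
  fun j hj => ((chain_covers len k k hk (cov_self hk) j hj).1).2

theorem bitSetGo_get (nodes : List Int) (k : ℕ) (v : Int) (hk : 0 < k) (j : ℕ) :
    (bitSetGo nodes (k : Int) v)[j]? =
      if j ∈ pvChain nodes.length k then nodes[j]?.map (fun x => max x v) else nodes[j]? := by
  rw [bitSetGo, pvChain]
  by_cases hlt : k < nodes.length
  · rw [dif_pos (by constructor <;> omega), dif_pos ⟨hk, hlt⟩]
    have htn : (k : Int).toNat = k := by omega
    have hlsb : (k : Int) + pyLsb (k : Int) = ((k + lsbN k : ℕ) : Int) := by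
      rw [pyLsb_eq _ (by omega), htn]; push_cast; ring
    rw [htn, hlsb]
    have hk' : 0 < k + lsbN k := by have := lsbN_pos hk; omega
    rw [bitSetGo_get _ (k + lsbN k) v hk' j]
    have hlen' : (nodes.set k (max (nodes.getD k 0) v)).length = nodes.length := by simp
    rw [hlen']
    by_cases hjk : j = k
    · subst hjk
      have hnot : j ∉ pvChain nodes.length (j + lsbN j) := by
        intro hmem
        have := chain_mem_ge nodes.length (j + lsbN j) (by omega) j hmem
        have := lsbN_pos hk
        omega
      rw [if_neg hnot, if_pos List.mem_cons_self]
      rw [List.getElem?_set_self (by omega)]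
      have hg : nodes.getD j 0 = nodes[j]'(by omega) := List.getD_eq_getElem _ _ hlt
      simp [hg, List.getElem?_eq_getElem hlt]
    · have hset : (nodes.set k (max (nodes.getD k 0) v))[j]? = nodes[j]? :=
        List.getElem?_set_ne (by omega)
      rw [hset]
      by_cases hmem : j ∈ pvChain nodes.length (k + lsbN k)
      · rw [if_pos hmem, if_pos (List.mem_cons_of_mem _ hmem)]
      · rw [if_neg hmem, if_neg (by intro hc; rcases List.mem_cons.mp hc with h | h; exact hjk h; exact hmem h)]
  · rw [dif_neg (by omega), dif_neg (by omega)]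
    simp
termination_by nodes.length - k
decreasing_by simp only [List.length_set]; have := lsbN_pos hk; omega

def pvInv (nodes : List Int) (g : ℕ → ℕ) : Prop :=
  ∀ j : ℕ, 0 < j → j < nodes.length →
    nodes[j]? = some (((Finset.Ioc (j - lsbN j) j).sup g : ℕ) : Int)

theorem sup_update_mem (s : Finset ℕ) (g : ℕ → ℕ) (k0 v : ℕ) (hk : k0 ∈ s) :
    s.sup (fun t => if t = k0 then max (g t) v else g t) = max (s.sup g) v := by
  apply le_antisymm
  · apply Finset.sup_le
    intro t ht
    split_ifs with h
    · exact max_le_max (Finset.le_sup ht) le_rfl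
    · exact le_max_of_le_left (Finset.le_sup ht)
  · apply max_le
    · apply Finset.sup_le
      intro t ht
      refine le_trans ?_ (Finset.le_sup (f := fun t => if t = k0 then max (g t) v else g t) ht)
      dsimp only
      split_ifs with h
      · exact le_max_left _ _
      · exact le_rfl
    · refine le_trans ?_ (Finset.le_sup (f := fun t => if t = k0 then max (g t) v else g t) hk)
      simp

theorem sup_update_not_mem (s : Finset ℕ) (g : ℕ → ℕ) (k0 v : ℕ) (hk : k0 ∉ s) :
    s.sup (fun t => if t = k0 then max (g t) v else g t) = s.sup g := by
  apply Finset.sup_congr rfl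
  intro t ht
  rw [if_neg (by rintro rfl; exact hk ht)]

theorem inv_set (nodes : List Int) (g : ℕ → ℕ) (hInv : pvInv nodes g) (k0 v : ℕ) (hk0 : 0 < k0) :
    pvInv (bitSetGo nodes (k0 : Int) ((v : ℕ) : Int))
      (fun t => if t = k0 then max (g t) v else g t) := by
  intro j hj hjlen
  rw [bitSetGo_length] at hjlen
  rw [bitSetGo_get nodes k0 _ hk0 j]
  by_cases hcov : pvCov k0 j
  · have hmem : j ∈ pvChain nodes.length k0 :=
      chain_reaches nodes.length k0 k0 j hk0 (cov_self hk0) hcov hcov.2 hjlen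
    rw [if_pos hmem, hInv j hj hjlen]
    have hk0mem : k0 ∈ Finset.Ioc (j - lsbN j) j := by
      unfold pvCov at hcov; rw [Finset.mem_Ioc]; omega
    rw [sup_update_mem _ _ _ _ hk0mem]
    simp [Nat.cast_max]
  · have hnmem : j ∉ pvChain nodes.length k0 := fun h =>
      hcov (chain_covers nodes.length k0 k0 hk0 (cov_self hk0) j h).1
    rw [if_neg hnmem, hInv j hj hjlen]
    have hk0nmem : k0 ∉ Finset.Ioc (j - lsbN j) j := by
      unfold pvCov at hcov; rw [Finset.mem_Ioc]; omega
    rw [sup_update_not_mem _ _ _ v hk0nmem]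

theorem queryGo_eq (nodes : List Int) (g : ℕ → ℕ) (hInv : pvInv nodes g) :
    ∀ k, k < nodes.length → ∀ r : ℕ,
      bitQueryGo nodes (k : Int) ((r : ℕ) : Int) = ((max r ((Finset.Ioc 0 k).sup g) : ℕ) : Int) := by
  intro k
  induction k using Nat.strong_induction_on with
  | _ k ih =>
    intro hlen r
    rw [bitQueryGo]
    by_cases hk : 0 < k
    · rw [dif_pos (by omega)]
      have htn : (k : Int).toNat = k := by omega
      have hl := lsbN_pos hk
      have hle : lsbN k ≤ k := lsbN_le
      have hlsb : (k : Int) - pyLsb (k : Int) = ((k - lsbN k : ℕ) : Int) := by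
        rw [pyLsb_eq _ (by omega), htn]; omega
      have hget : nodes.getD (k : Int).toNat 0 = (((Finset.Ioc (k - lsbN k) k).sup g : ℕ) : Int) := by
        rw [htn, List.getD_eq_getElem?_getD, hInv k hk hlen]; rfl
      rw [hget, hlsb]
      have hmax : max ((r : ℕ) : Int) (((Finset.Ioc (k - lsbN k) k).sup g : ℕ) : Int)
          = ((max r ((Finset.Ioc (k - lsbN k) k).sup g) : ℕ) : Int) := by
        simp [Nat.cast_max]
      rw [hmax, ih (k - lsbN k) (by omega) (by omega)]
      congr 1
      have hsplit : Finset.Ioc 0 (k - lsbN k) ∪ Finset.Ioc (k - lsbN k) k = Finset.Ioc 0 k :=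
        Finset.Ioc_union_Ioc_eq_Ioc (by omega) (by omega)
      rw [← hsplit, Finset.sup_union]
      omega
    · rw [dif_neg (by omega)]
      have : k = 0 := by omega
      subst this
      simp

-- ===== compression / rank lemmas =====

def pvKeyL (A : List Int) (i : ℕ) : Lex (ℤ × ℤ) := toLex (A.getD i 0, (i : ℤ))

def pvVi (A : List Int) : List (ℤ × ℤ) :=
  PySem.List.sorted2 ((PySem.List.enumerate A).map (fun p => (p.2, p.1))) (fun p => p.1) (fun p => p.2)

def pvRk (A : List Int) (i : ℕ) : ℕ := (pvVi A).idxOf (A.getD i 0, (i : ℤ))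

theorem sorted2_lex (xs : List (ℤ × ℤ)) :
    PySem.List.sorted2 xs (fun p => p.1) (fun p => p.2)
      = PySem.List.sorted xs (fun p => toLex p) false := by
  have hB : (fun (a b : ℤ × ℤ) => decide (a.1 < b.1) || (!decide (b.1 < a.1) && decide (a.2 < b.2)))
      = (fun (a b : ℤ × ℤ) => decide (toLex a < toLex b)) := by
    funext a b
    have hiff : (toLex a < toLex b) ↔ (a.1 < b.1 ∨ a.1 = b.1 ∧ a.2 < b.2) := Prod.Lex.lt_iff
    rcases lt_trichotomy a.1 b.1 with h | h | h
    · simp [hiff, h]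
    · simp [hiff, h, lt_irrefl]
    · simp [hiff, h, lt_asymm h, ne_of_gt h]
  have h1 : PySem.List.sorted2 xs (fun p => p.1) (fun p => p.2)
      = List.foldl (fun acc x => PySem.List.insertBy
          (fun (a b : ℤ × ℤ) => decide (a.1 < b.1) || (!decide (b.1 < a.1) && decide (a.2 < b.2))) x acc) [] xs := rfl
  rw [h1, PySem.List.sorted_eq_foldl_insertBy, hB]

theorem vi_eq (A : List Int) :
    pvVi A = PySem.List.sorted ((PySem.List.enumerate A).map (fun p => (p.2, p.1))) (fun p => toLex p) false :=
  sorted2_lex _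

theorem sw_nodup (A : List Int) : ((PySem.List.enumerate A).map (fun p => (p.2, p.1))).Nodup := by
  have h := PySem.List.pairwise_lt_enumerate A 0
  have h2 : List.Pairwise (fun a b : ℤ × ℤ => a.2 < b.2) ((PySem.List.enumerate A).map (fun p => (p.2, p.1))) := by
    rw [List.pairwise_map]
    exact h
  exact h2.imp (fun hab => by intro he; rw [he] at hab; exact lt_irrefl _ hab)

theorem vi_length (A : List Int) : (pvVi A).length = A.length := by
  rw [vi_eq]
  calc (PySem.List.sorted _ _ false).length
      = ((PySem.List.enumerate A).map (fun p => (p.2, p.1))).length := (PySem.List.sorted_perm _ _ _).length_eq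
    _ = A.length := by rw [List.length_map, PySem.List.length_enumerate]

theorem vi_pairwise_lt (A : List Int) :
    (pvVi A).Pairwise (fun a b => toLex a < toLex b) := by
  have hle : (pvVi A).Pairwise (fun a b => toLex a ≤ toLex b) := by
    rw [vi_eq]; exact PySem.List.sorted_pairwise _ _
  have hnd : (pvVi A).Nodup := by
    rw [vi_eq]
    exact ((PySem.List.sorted_perm _ _ _).symm).nodup (sw_nodup A)
  refine (hle.and hnd).imp ?_
  rintro a b ⟨h1, h2⟩
  exact lt_of_le_of_ne h1 (fun he => h2 (by
    have : (ofLex (toLex a)) = (ofLex (toLex b)) := by rw [he]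
    simpa using this))

theorem mem_vi (A : List Int) (i : ℕ) (hi : i < A.length) :
    (A.getD i 0, (i : ℤ)) ∈ pvVi A := by
  rw [vi_eq, PySem.List.mem_sorted]
  refine List.mem_map.mpr ⟨((i : ℤ), A[i]), ?_, by simp [List.getD_eq_getElem?_getD, List.getElem?_eq_getElem hi]⟩
  exact (PySem.List.mem_enumerate_iff A 0 _).mpr ⟨i, hi, by simp⟩

theorem rk_lt (A : List Int) (i : ℕ) (hi : i < A.length) : pvRk A i < A.length := by
  rw [← vi_length A]
  exact List.idxOf_lt_length_of_mem (mem_vi A i hi)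

theorem vi_get_rk (A : List Int) (i : ℕ) (hi : i < A.length) :
    (pvVi A)[pvRk A i]'(by rw [vi_length]; exact rk_lt A i hi) = (A.getD i 0, (i : ℤ)) :=
  List.getElem_idxOf (by rw [vi_length]; exact rk_lt A i hi)

theorem vi_get_lt (A : List Int) (p q : ℕ) (hq : q < (pvVi A).length) (hpq : p < q) :
    toLex ((pvVi A)[p]'(lt_trans hpq hq)) < toLex ((pvVi A)[q]'hq) :=
  List.pairwise_iff_getElem.mp (vi_pairwise_lt A) p q (lt_trans hpq hq) hq hpq

theorem vi_get_rk? (A : List Int) (i : ℕ) (hi : i < A.length) :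
    (pvVi A)[pvRk A i]? = some (A.getD i 0, (i : ℤ)) := by
  rw [List.getElem?_eq_getElem (by rw [vi_length]; exact rk_lt A i hi), vi_get_rk A i hi]

theorem rk_inj (A : List Int) (i j : ℕ) (hi : i < A.length) (hj : j < A.length)
    (h : pvRk A i = pvRk A j) : i = j := by
  have h1 := vi_get_rk? A i hi
  have h2 := vi_get_rk? A j hj
  rw [h] at h1
  rw [h1] at h2
  have := congrArg (fun o => (Option.map Prod.snd o)) h2
  simpa using this

theorem rk_lt_iff (A : List Int) (i j : ℕ) (hi : i < A.length) (hj : j < A.length) :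
    pvRk A j < pvRk A i ↔ pvKeyL A j < pvKeyL A i := by
  constructor
  · intro h
    have := vi_get_lt A (pvRk A j) (pvRk A i) (by rw [vi_length]; exact rk_lt A i hi) h
    rw [vi_get_rk A j hj, vi_get_rk A i hi] at this
    exact this
  · intro h
    rcases lt_trichotomy (pvRk A j) (pvRk A i) with hc | hc | hc
    · exact hc
    · exfalso
      have := rk_inj A j i hj hi hc
      subst this
      exact lt_irrefl _ h
    · exfalso
      have := vi_get_lt A (pvRk A i) (pvRk A j) (by rw [vi_length]; exact rk_lt A j hj) hc
      rw [vi_get_rk A j hj, vi_get_rk A i hi] at this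
      exact lt_asymm h this

theorem rk_map_nodup (A : List Int) : ((List.range A.length).map (pvRk A)).Nodup := by
  rw [List.Nodup, List.pairwise_iff_getElem]
  intro p q hp hq hpq
  simp only [List.getElem_map, List.getElem_range] at *
  rw [List.length_map, List.length_range] at hp hq
  intro he
  exact absurd (rk_inj A p q hp hq he) (by omega)

theorem rk_map_perm (A : List Int) :
    ((List.range A.length).map (pvRk A)).Perm (List.range A.length) := by
  apply List.perm_of_nodup_nodup_toFinset_eq (rk_map_nodup A) (List.nodup_range)
  apply Finset.eq_of_subset_of_card_le
  · intro x hx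
    rw [List.mem_toFinset] at hx ⊢
    obtain ⟨i, hi, rfl⟩ := List.mem_map.mp hx
    rw [List.mem_range] at hi ⊢
    exact rk_lt A i hi
  · simp [List.toFinset_card_of_nodup (rk_map_nodup A), List.toFinset_card_of_nodup List.nodup_range]

theorem rk_surj (A : List Int) (r : ℕ) (hr : r < A.length) : ∃ i, i < A.length ∧ pvRk A i = r := by
  have : r ∈ (List.range A.length).map (pvRk A) :=
    (rk_map_perm A).mem_iff.mpr (List.mem_range.mpr hr)
  obtain ⟨i, hi, he⟩ := List.mem_map.mp this
  exact ⟨i, List.mem_range.mp hi, he⟩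

theorem inv_list_eq (A : List Int) :
    ((PySem.List.enumerate (pvVi A)).map (fun q => (q.2.2, q.1)))
      = (List.range A.length).map (fun r => (((pvVi A).getD r (0, 0)).2, (r : ℤ))) := by
  apply List.ext_getElem
  · rw [List.length_map, PySem.List.length_enumerate, vi_length, List.length_map, List.length_range]
  · intro r h1 h2
    rw [List.length_map, PySem.List.length_enumerate, vi_length] at h1
    simp only [List.getElem_map, List.getElem_range]
    rw [PySem.List.getElem_enumerate]
    have hr : r < (pvVi A).length := by rw [vi_length]; exact h1
    rw [List.getD_eq_getElem _ _ hr]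
    simp

theorem sorted_inv_eq (A : List Int) :
    PySem.List.sorted2 ((PySem.List.enumerate (pvVi A)).map (fun q => (q.2.2, q.1)))
        (fun p => p.1) (fun p => p.2)
      = (List.range A.length).map (fun (i : ℕ) => ((i : ℤ), (pvRk A i : ℤ))) := by
  rw [sorted2_lex]
  apply PySem.List.sorted_eq_of_perm_of_pairwise_lt
  · -- perm
    rw [inv_list_eq]
    have hperm := (rk_map_perm A).map (fun r => (((pvVi A).getD r (0, 0)).2, (r : ℤ)))
    have hcongr : (List.range A.length).map (fun (i : ℕ) => ((i : ℤ), (pvRk A i : ℤ)))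
        = ((List.range A.length).map (pvRk A)).map (fun r => (((pvVi A).getD r (0, 0)).2, (r : ℤ))) := by
      rw [List.map_map]
      apply List.map_congr_left
      intro i hi
      rw [List.mem_range] at hi
      have hrk : pvRk A i < (pvVi A).length := by rw [vi_length]; exact rk_lt A i hi
      simp only [Function.comp_apply]
      rw [List.getD_eq_getElem _ _ hrk, vi_get_rk A i hi]
    rw [hcongr]
    exact hperm
  · rw [List.pairwise_map, List.pairwise_iff_getElem]
    intro p q hp hq hpq
    rw [List.length_range] at hp hq
    simp only [List.getElem_range]
    rw [Prod.Lex.lt_iff]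
    left
    show (p : ℤ) < (q : ℤ)
    exact_mod_cast hpq

theorem compress_eq (A : List Int) :
    compress A = (List.range A.length).map (fun i => ((pvRk A i : ℕ) : ℤ)) := by
  show (PySem.List.sorted2 ((PySem.List.enumerate (pvVi A)).map (fun q => (q.2.2, q.1)))
        (fun p => p.1) (fun p => p.2)).map (fun p => p.2) = _
  rw [sorted_inv_eq, List.map_map]
  rfl

theorem compress_getD (A : List Int) (i : ℕ) (hi : i < A.length) :
    (compress A).getD i 0 = ((pvRk A i : ℕ) : ℤ) := by
  rw [compress_eq]
  rw [List.getD_eq_getElem _ _ (by rw [List.length_map, List.length_range]; exact hi)]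
  simp

theorem compress_length (A : List Int) : (compress A).length = A.length := by
  rw [compress_eq, List.length_map, List.length_range]

theorem maxA_eq (A : List Int) (h : A ≠ []) :
    (PySem.List.max? (compress A) (fun x => x)).getD 0 = ((A.length - 1 : ℕ) : ℤ) := by
  have hn : 0 < A.length := List.length_pos_iff.mpr h
  have hne : compress A ≠ [] := by
    intro he
    have := compress_length A
    rw [he] at this
    simp at this
    omega
  obtain ⟨m, hm⟩ : ∃ m, PySem.List.max? (compress A) (fun x => x) = some m := by
    cases hmax : PySem.List.max? (compress A) (fun x => x) with
    | none => exact absurd ((PySem.List.max?_eq_none_iff _ _).mp hmax) hne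
    | some m => exact ⟨m, rfl⟩
  rw [hm]
  have hmem := PySem.List.max?_mem hm
  rw [compress_eq] at hmem
  obtain ⟨i, hi, rfl⟩ := List.mem_map.mp hmem
  rw [List.mem_range] at hi
  have hle : pvRk A i ≤ A.length - 1 := by have := rk_lt A i hi; omega
  obtain ⟨i', hi', hrk'⟩ := rk_surj A (A.length - 1) (by omega)
  have hmax' := PySem.List.max?_isMax hm (((A.length - 1 : ℕ) : ℤ)) (by
    rw [compress_eq]
    refine List.mem_map.mpr ⟨i', List.mem_range.mpr hi', by rw [hrk']⟩)
  simp only [Option.getD_some]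
  have : ((pvRk A i : ℕ) : ℤ) ≤ ((A.length - 1 : ℕ) : ℤ) := by exact_mod_cast hle
  omega

-- ===== DP spec layer =====

def pvV (pos base : ℕ → ℕ) (i : ℕ) : ℕ :=
  max (base i) (((Finset.range i).attach.sup (fun j => if pos j.1 < pos i then pvV pos base j.1 else 0)) + 1)
termination_by i
decreasing_by exact Finset.mem_range.mp j.2

theorem pvV_eq (pos base : ℕ → ℕ) (i : ℕ) :
    pvV pos base i
      = max (base i) ((Finset.range i).sup (fun j => if pos j < pos i then pvV pos base j else 0) + 1) := by
  have h := Finset.sup_attach (Finset.range i) (fun j => if pos j < pos i then pvV pos base j else 0)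
  rw [pvV, h]

def pvG (v pos : ℕ → ℕ) (i : ℕ) : ℕ → ℕ :=
  fun t => ((Finset.range i).filter (fun j => pos j + 1 = t)).sup v

theorem query_sup (nodes : List Int) (v pos : ℕ → ℕ) (i : ℕ)
    (hInv : pvInv nodes (pvG v pos i)) (hp : pos i < nodes.length) :
    bitQueryMax nodes ((pos i : ℤ) - 1)
      = (((Finset.range i).sup (fun j => if pos j < pos i then v j else 0) : ℕ) : ℤ) := by
  have h1 : ((pos i : ℤ) - 1) + 1 = ((pos i : ℕ) : ℤ) := by ring
  unfold bitQueryMax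
  rw [h1]
  have h0 : (0 : ℤ) = ((0 : ℕ) : ℤ) := rfl
  rw [h0, queryGo_eq nodes (pvG v pos i) hInv (pos i) hp 0]
  congr 1
  rw [Nat.max_eq_right (Nat.zero_le _)]
  apply le_antisymm
  · apply Finset.sup_le
    intro t ht
    rw [Finset.mem_Ioc] at ht
    apply Finset.sup_le
    intro j hj
    rw [Finset.mem_filter, Finset.mem_range] at hj
    have : pos j < pos i := by omega
    calc v j = (if pos j < pos i then v j else 0) := by rw [if_pos this]
      _ ≤ _ := Finset.le_sup (f := fun j => if pos j < pos i then v j else 0) (Finset.mem_range.mpr hj.1)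
  · apply Finset.sup_le
    intro j hj
    split_ifs with hc
    · have hh1 : v j ≤ pvG v pos i (pos j + 1) :=
        Finset.le_sup (f := v) (Finset.mem_filter.mpr ⟨hj, rfl⟩)
      have hh2 : pvG v pos i (pos j + 1) ≤ (Finset.Ioc 0 (pos i)).sup (pvG v pos i) :=
        Finset.le_sup (Finset.mem_Ioc.mpr ⟨by omega, by omega⟩)
      exact le_trans hh1 hh2
    · exact Nat.zero_le _

theorem set_inv (nodes : List Int) (v pos : ℕ → ℕ) (i : ℕ)
    (hInv : pvInv nodes (pvG v pos i)) :
    pvInv (bitSetMax nodes ((pos i : ℕ) : ℤ) ((v i : ℕ) : ℤ)) (pvG v pos (i + 1)) := by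
  unfold bitSetMax
  have hc : ((pos i : ℕ) : ℤ) + 1 = (((pos i + 1 : ℕ)) : ℤ) := by push_cast; ring
  rw [hc]
  have h := inv_set nodes (pvG v pos i) hInv (pos i + 1) (v i) (by omega)
  have hg : (fun t => if t = pos i + 1 then max (pvG v pos i t) (v i) else pvG v pos i t)
      = pvG v pos (i + 1) := by
    funext t
    unfold pvG
    rw [Finset.range_add_one, Finset.filter_insert]
    by_cases ht : t = pos i + 1
    · rw [if_pos ht, if_pos (by omega : pos i + 1 = t), Finset.sup_insert]
      exact max_comm _ _
    · rw [if_neg ht, if_neg (by omega : ¬ pos i + 1 = t)]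
  rw [hg] at h
  exact h

theorem pvG_zero (n : ℕ) (v pos : ℕ → ℕ) : pvInv (List.replicate n (0 : ℤ)) (pvG v pos 0) := by
  intro j hj hjl
  rw [List.length_replicate] at hjl
  rw [List.getElem?_replicate, if_pos hjl]
  have hz : (Finset.Ioc (j - lsbN j) j).sup (pvG v pos 0) = 0 := by
    apply Nat.le_antisymm _ (Nat.zero_le _)
    apply Finset.sup_le
    intro t ht
    unfold pvG
    simp
  rw [hz]
  rfl

def pvDpMap (n i : ℕ) (v : ℕ → ℕ) : List Int :=
  (List.range n).map (fun j => if j < i then ((v j : ℕ) : ℤ) else -1)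

theorem pvDpMap_zero (n : ℕ) (v : ℕ → ℕ) : pvDpMap n 0 v = List.replicate n (-1) := by
  unfold pvDpMap
  rw [List.eq_replicate_iff]
  constructor
  · rw [List.length_map, List.length_range]
  · intro b hb
    obtain ⟨j, _, rfl⟩ := List.mem_map.mp hb
    simp

theorem pvDpMap_set (n i : ℕ) (v : ℕ → ℕ) (hi : i < n) :
    (pvDpMap n i v).set i ((v i : ℕ) : ℤ) = pvDpMap n (i + 1) v := by
  unfold pvDpMap
  apply List.ext_getElem
  · simp
  · intro k h1 h2
    simp only [List.length_set, List.length_map, List.length_range] at h1 h2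
    rw [List.getElem_set]
    simp only [List.getElem_map, List.getElem_range]
    by_cases hc : i = k
    · subst hc
      rw [if_pos rfl, if_pos (by omega : i < i + 1)]
    · rw [if_neg hc]
      split_ifs <;> first | rfl | omega

theorem pvDpMap_full_getD (n : ℕ) (v : ℕ → ℕ) (i : ℕ) (hi : i < n) :
    (pvDpMap n n v).getD i 0 = ((v i : ℕ) : ℤ) := by
  unfold pvDpMap
  rw [List.getD_eq_getElem _ _ (by simp; exact hi)]
  simp [hi]

theorem pass_aux (n : ℕ) (pos base : ℕ → ℕ)
    (F : (List Int × List Int) → ℕ → (List Int × List Int))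
    (hpos : ∀ i, i < n → pos i < n)
    (hF : ∀ nodes dp i, i < n → pvInv nodes (pvG (pvV pos base) pos i) → nodes.length = n →
        F (nodes, dp) i = (bitSetMax nodes ((pos i : ℕ) : ℤ) ((pvV pos base i : ℕ) : ℤ),
                           dp.set i ((pvV pos base i : ℕ) : ℤ))) :
    ∀ i, i ≤ n → ∃ nodes,
      (List.range i).foldl F (List.replicate n 0, List.replicate n (-1))
          = (nodes, pvDpMap n i (pvV pos base))
        ∧ pvInv nodes (pvG (pvV pos base) pos i) ∧ nodes.length = n := by
  intro i
  induction i with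
  | zero =>
      intro _
      refine ⟨List.replicate n 0, ?_, pvG_zero n _ _, List.length_replicate⟩
      rw [List.range_zero, List.foldl_nil, pvDpMap_zero]
  | succ i ih =>
      intro hle
      obtain ⟨nodes, hfold, hinv, hlen⟩ := ih (by omega)
      rw [List.range_succ, List.foldl_append, hfold, List.foldl_cons, List.foldl_nil,
          hF nodes _ i (by omega) hinv hlen]
      refine ⟨bitSetMax nodes ((pos i : ℕ) : ℤ) ((pvV pos base i : ℕ) : ℤ), ?_, ?_, ?_⟩
      · rw [pvDpMap_set n i _ (by omega)]
      · exact set_inv nodes _ pos i hinv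
      · unfold bitSetMax
        rw [bitSetGo_length]
        exact hlen

-- ===== the three passes =====

def pvF0 (A : List Int) : ℕ → ℕ := pvV (pvRk A) (fun _ => 0)
def pvPos1 (A : List Int) : ℕ → ℕ := fun i => A.length - 1 - pvRk A i
def pvF1 (A : List Int) : ℕ → ℕ := pvV (pvPos1 A) (pvF0 A)
def pvF2 (A : List Int) : ℕ → ℕ := pvV (pvRk A) (pvF1 A)

theorem dp0_eq (A : List Int) (h : A ≠ []) :
    ((List.range A.length).foldl (pass0Step (compress A))
        (List.replicate A.length 0, List.replicate A.length (-1))).2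
      = pvDpMap A.length A.length (pvF0 A) := by
  obtain ⟨nodes, hfold, -, -⟩ := pass_aux A.length (pvRk A) (fun _ => 0) (pass0Step (compress A))
    (fun i hi => rk_lt A i hi)
    (by
      intro nodes dp i hi hinv hlen
      unfold pass0Step
      dsimp only
      rw [compress_getD A i hi]
      rw [query_sup nodes (pvV (pvRk A) (fun _ => 0)) (pvRk A) i hinv (by rw [hlen]; exact rk_lt A i hi)]
      have hl : ((((Finset.range i).sup (fun j => if pvRk A j < pvRk A i then pvV (pvRk A) (fun _ => 0) j else 0) : ℕ)) : ℤ) + 1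
          = ((pvV (pvRk A) (fun _ => 0) i : ℕ) : ℤ) := by
        rw [pvV_eq]
        push_cast
        omega
      rw [hl])
    A.length le_rfl
  rw [hfold]
  rfl

theorem dp1_eq (A : List Int) (h : A ≠ []) :
    ((List.range A.length).foldl
        (pass1Step (compress A) ((A.length - 1 : ℕ) : ℤ) (pvDpMap A.length A.length (pvF0 A)))
        (List.replicate A.length 0, List.replicate A.length (-1))).2
      = pvDpMap A.length A.length (pvF1 A) := by
  have hn : 0 < A.length := List.length_pos_iff.mpr h
  obtain ⟨nodes, hfold, -, -⟩ := pass_aux A.length (pvPos1 A) (pvF0 A)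
    (pass1Step (compress A) ((A.length - 1 : ℕ) : ℤ) (pvDpMap A.length A.length (pvF0 A)))
    (fun i hi => by unfold pvPos1; omega)
    (by
      intro nodes dp i hi hinv hlen
      unfold pass1Step
      dsimp only
      rw [compress_getD A i hi]
      have hrk : pvRk A i ≤ A.length - 1 := by have := rk_lt A i hi; omega
      have hsub : ((A.length - 1 : ℕ) : ℤ) - ((pvRk A i : ℕ) : ℤ) = ((pvPos1 A i : ℕ) : ℤ) := by
        unfold pvPos1
        push_cast [Nat.cast_sub hrk]
        ring
      rw [hsub]
      rw [query_sup nodes (pvV (pvPos1 A) (pvF0 A)) (pvPos1 A) i hinv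
            (by rw [hlen]; unfold pvPos1; omega)]
      rw [pvDpMap_full_getD A.length (pvF0 A) i hi]
      have hl : max ((pvF0 A i : ℕ) : ℤ)
            ((((Finset.range i).sup (fun j => if pvPos1 A j < pvPos1 A i then pvV (pvPos1 A) (pvF0 A) j else 0) : ℕ) : ℤ) + 1)
          = ((pvV (pvPos1 A) (pvF0 A) i : ℕ) : ℤ) := by
        rw [pvV_eq]
        push_cast
        rfl
      rw [hl])
    A.length le_rfl
  rw [hfold]
  rfl

theorem dp2_eq (A : List Int) (h : A ≠ []) :
    ((List.range A.length).foldl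
        (pass2Step (compress A) (pvDpMap A.length A.length (pvF1 A)))
        (List.replicate A.length 0, List.replicate A.length (-1))).2
      = pvDpMap A.length A.length (pvF2 A) := by
  obtain ⟨nodes, hfold, -, -⟩ := pass_aux A.length (pvRk A) (pvF1 A)
    (pass2Step (compress A) (pvDpMap A.length A.length (pvF1 A)))
    (fun i hi => rk_lt A i hi)
    (by
      intro nodes dp i hi hinv hlen
      unfold pass2Step
      dsimp only
      rw [compress_getD A i hi]
      rw [query_sup nodes (pvV (pvRk A) (pvF1 A)) (pvRk A) i hinv (by rw [hlen]; exact rk_lt A i hi)]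
      rw [pvDpMap_full_getD A.length (pvF1 A) i hi]
      have hl : max ((pvF1 A i : ℕ) : ℤ)
            ((((Finset.range i).sup (fun j => if pvRk A j < pvRk A i then pvV (pvRk A) (pvF1 A) j else 0) : ℕ) : ℤ) + 1)
          = ((pvV (pvRk A) (pvF1 A) i : ℕ) : ℤ) := by
        rw [pvV_eq]
        push_cast
        rfl
      rw [hl])
    A.length le_rfl
  rw [hfold]
  rfl

theorem pvDpMap_full (n : ℕ) (v : ℕ → ℕ) :
    pvDpMap n n v = (List.range n).map (fun j => ((v j : ℕ) : ℤ)) := by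
  unfold pvDpMap
  apply List.map_congr_left
  intro j hj
  rw [if_pos (List.mem_range.mp hj)]

theorem list_max_getD (n : ℕ) (v : ℕ → ℕ) (hn : 0 < n) :
    (PySem.List.max? ((List.range n).map (fun j => ((v j : ℕ) : ℤ))) (fun x => x)).getD 0
      = (((Finset.range n).sup v : ℕ) : ℤ) := by
  have hne : (List.range n).map (fun j => ((v j : ℕ) : ℤ)) ≠ [] := by
    simp
    omega
  obtain ⟨m, hm⟩ : ∃ m, PySem.List.max? ((List.range n).map (fun j => ((v j : ℕ) : ℤ))) (fun x => x) = some m := by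
    cases hmax : PySem.List.max? ((List.range n).map (fun j => ((v j : ℕ) : ℤ))) (fun x => x) with
    | none => exact absurd ((PySem.List.max?_eq_none_iff _ _).mp hmax) hne
    | some m => exact ⟨m, rfl⟩
  rw [hm, Option.getD_some]
  obtain ⟨i, hi, rfl⟩ := List.mem_map.mp (PySem.List.max?_mem hm)
  rw [List.mem_range] at hi
  apply le_antisymm
  · exact_mod_cast Finset.le_sup (f := v) (Finset.mem_range.mpr hi)
  · obtain ⟨b, hb, hbe⟩ := Finset.exists_mem_eq_sup (Finset.range n) ⟨0, Finset.mem_range.mpr hn⟩ v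
    rw [hbe]
    exact PySem.List.max?_isMax hm _ (List.mem_map.mpr ⟨b, List.mem_range.mpr (Finset.mem_range.mp hb), rfl⟩)

theorem solution_eq_sup (A : List Int) (h : A ≠ []) :
    solution A = (((Finset.range A.length).sup (pvF2 A) : ℕ) : ℤ) := by
  have hn : 0 < A.length := List.length_pos_iff.mpr h
  unfold solution
  dsimp only
  rw [compress_length, maxA_eq A h]
  have hstart : (((A.length - 1 : ℕ) : ℤ) + 1).toNat = A.length := by omega
  rw [hstart]
  rw [dp0_eq A h, dp1_eq A h, dp2_eq A h]
  rw [pvDpMap_full, pvDpMap_full, pvDpMap_full]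
  rw [list_max_getD _ _ hn, list_max_getD _ _ hn, list_max_getD _ _ hn]
  have h10 : (Finset.range A.length).sup (pvF0 A) ≤ (Finset.range A.length).sup (pvF1 A) := by
    apply Finset.sup_mono_fun
    intro i _
    unfold pvF1
    rw [pvV_eq]
    exact le_max_left _ _
  have h21 : (Finset.range A.length).sup (pvF1 A) ≤ (Finset.range A.length).sup (pvF2 A) := by
    apply Finset.sup_mono_fun
    intro i _
    unfold pvF2
    rw [pvV_eq]
    exact le_max_left _ _
  have c1 : (((Finset.range A.length).sup (pvF1 A) : ℕ) : ℤ) ≤ (((Finset.range A.length).sup (pvF2 A) : ℕ) : ℤ) := by exact_mod_cast h21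
  have c0 : (((Finset.range A.length).sup (pvF0 A) : ℕ) : ℤ) ≤ (((Finset.range A.length).sup (pvF2 A) : ℕ) : ℤ) := by exact_mod_cast le_trans h10 h21
  rw [max_eq_left c1, max_eq_left c0]

-- ===== B side =====

theorem rkcond0 (A : List Int) (i j : ℕ) (hi : i < A.length) (hj : j < i) :
    (pvRk A j < pvRk A i) ↔ (A.getD j 0 ≤ A.getD i 0) := by
  rw [rk_lt_iff A i j hi (lt_trans hj hi)]
  unfold pvKeyL
  rw [Prod.Lex.lt_iff]
  constructor
  · rintro (hlt | ⟨heq, -⟩)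
    · exact le_of_lt hlt
    · exact le_of_eq heq
  · intro hle
    rcases lt_or_eq_of_le hle with hlt | heq
    · exact Or.inl hlt
    · refine Or.inr ⟨heq, ?_⟩
      show (j : ℤ) < (i : ℤ)
      exact_mod_cast hj

theorem rkcond1 (A : List Int) (i j : ℕ) (hi : i < A.length) (hj : j < i) :
    (pvPos1 A j < pvPos1 A i) ↔ (A.getD i 0 < A.getD j 0) := by
  have hrj := rk_lt A j (lt_trans hj hi)
  have hri := rk_lt A i hi
  have h1 : (pvPos1 A j < pvPos1 A i) ↔ pvRk A i < pvRk A j := by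
    unfold pvPos1
    omega
  rw [h1, rk_lt_iff A j i (lt_trans hj hi) hi]
  unfold pvKeyL
  rw [Prod.Lex.lt_iff]
  constructor
  · rintro (hlt | ⟨-, hc⟩)
    · exact hlt
    · exfalso
      have : (i : ℤ) < (j : ℤ) := hc
      omega
  · intro hlt
    exact Or.inl hlt

theorem inner_fold (a : ℤ) (g0 g1 g2 : ℕ → ℕ) (w : ℕ → ℤ) (i : ℕ) :
    ((List.range i).map (fun j => ((((g0 j : ℕ) : ℤ), ((g1 j : ℕ) : ℤ), ((g2 j : ℕ) : ℤ)), w j))).foldl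
        (altInner a) (0, 0, 0)
      = ((((Finset.range i).sup (fun j => if w j ≤ a then g0 j else 0) : ℕ) : ℤ),
         (((Finset.range i).sup (fun j => if ¬ (w j ≤ a) then g1 j else 0) : ℕ) : ℤ),
         (((Finset.range i).sup (fun j => if w j ≤ a then g2 j else 0) : ℕ) : ℤ)) := by
  induction i with
  | zero => simp
  | succ i ih =>
      rw [List.range_succ, List.map_append, List.foldl_append, ih]
      simp only [List.map_cons, List.map_nil, List.foldl_cons, List.foldl_nil]
      unfold altInner
      rw [Finset.range_add_one, Finset.sup_insert, Finset.sup_insert, Finset.sup_insert]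
      by_cases hc : w i ≤ a
      · rw [if_pos hc]
        simp only [if_pos hc, if_neg (not_not_intro hc)]
        push_cast
        rw [max_comm ((g0 i : ℤ)) _, max_comm ((g2 i : ℤ)) _,
            max_eq_right (by positivity : (0:ℤ) ≤ _)]
      · rw [if_neg hc]
        simp only [if_neg hc, if_pos hc]
        push_cast
        rw [max_comm ((g1 i : ℤ)) _, max_eq_right (by positivity : (0:ℤ) ≤ _),
            max_eq_right (by positivity : (0:ℤ) ≤ _)]

theorem take_succ_getD (A : List Int) (i : ℕ) (hi : i < A.length) :
    A.take (i + 1) = A.take i ++ [A.getD i 0] := by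
  rw [List.take_succ, List.getElem?_eq_getElem hi, List.getD_eq_getElem A 0 hi]
  rfl

theorem alt_aux (A : List Int) :
    ∀ i, i ≤ A.length → (A.take i).foldl (altStep A) []
      = (List.range i).map (fun j => ((((pvF0 A j : ℕ) : ℤ), ((pvF1 A j : ℕ) : ℤ), ((pvF2 A j : ℕ) : ℤ)))) := by
  intro i
  induction i with
  | zero => intro _; simp
  | succ i ih =>
      intro hle
      have hi : i < A.length := by omega
      rw [take_succ_getD A i hi, List.foldl_append, ih (by omega), List.foldl_cons, List.foldl_nil]
      unfold altStep
      dsimp only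
      have hzip : ((List.range i).map (fun j => ((((pvF0 A j : ℕ) : ℤ), ((pvF1 A j : ℕ) : ℤ), ((pvF2 A j : ℕ) : ℤ))))).zip A
          = (List.range i).map (fun j => (((((pvF0 A j : ℕ) : ℤ), ((pvF1 A j : ℕ) : ℤ), ((pvF2 A j : ℕ) : ℤ))), A.getD j 0)) := by
        apply List.ext_getElem
        · simp
          omega
        · intro k h1 h2
          simp only [List.length_zip, List.length_map, List.length_range, min_eq_left] at h1 h2
          rw [List.getElem_zip]
          simp only [List.getElem_map, List.getElem_range]
          rw [List.length_map, List.length_range] at *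
          congr 1
          rw [List.getD_eq_getElem A 0 (by omega)]
      rw [hzip, inner_fold (A.getD i 0) (pvF0 A) (pvF1 A) (pvF2 A) (fun j => A.getD j 0) i]
      have hs0 : (Finset.range i).sup (fun j => if A.getD j 0 ≤ A.getD i 0 then pvF0 A j else 0)
          = (Finset.range i).sup (fun j => if pvRk A j < pvRk A i then pvV (pvRk A) (fun _ => 0) j else 0) := by
        apply Finset.sup_congr rfl
        intro j hj
        exact if_congr ((rkcond0 A i j hi (Finset.mem_range.mp hj)).symm) rfl rfl
      have hs2 : (Finset.range i).sup (fun j => if A.getD j 0 ≤ A.getD i 0 then pvF2 A j else 0)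
          = (Finset.range i).sup (fun j => if pvRk A j < pvRk A i then pvV (pvRk A) (pvF1 A) j else 0) := by
        apply Finset.sup_congr rfl
        intro j hj
        exact if_congr ((rkcond0 A i j hi (Finset.mem_range.mp hj)).symm) rfl rfl
      have hs1 : (Finset.range i).sup (fun j => if ¬ (A.getD j 0 ≤ A.getD i 0) then pvF1 A j else 0)
          = (Finset.range i).sup (fun j => if pvPos1 A j < pvPos1 A i then pvV (pvPos1 A) (pvF0 A) j else 0) := by
        apply Finset.sup_congr rfl
        intro j hj
        exact if_congr (not_le.trans (rkcond1 A i j hi (Finset.mem_range.mp hj)).symm) rfl rfl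
      rw [hs0, hs1, hs2]
      have hd0 : (((Finset.range i).sup (fun j => if pvRk A j < pvRk A i then pvV (pvRk A) (fun _ => 0) j else 0) : ℕ) : ℤ) + 1
          = ((pvF0 A i : ℕ) : ℤ) := by
        unfold pvF0
        rw [pvV_eq]
        push_cast
        omega
      have hd1 : max ((pvF0 A i : ℕ) : ℤ)
            ((((Finset.range i).sup (fun j => if pvPos1 A j < pvPos1 A i then pvV (pvPos1 A) (pvF0 A) j else 0) : ℕ) : ℤ) + 1)
          = ((pvF1 A i : ℕ) : ℤ) := by
        unfold pvF1
        rw [pvV_eq]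
        push_cast
        rfl
      have hd2 : max ((pvF1 A i : ℕ) : ℤ)
            ((((Finset.range i).sup (fun j => if pvRk A j < pvRk A i then pvV (pvRk A) (pvF1 A) j else 0) : ℕ) : ℤ) + 1)
          = ((pvF2 A i : ℕ) : ℤ) := by
        unfold pvF2
        rw [pvV_eq]
        push_cast
        rfl
      rw [hd0, hd1, hd2, List.range_succ, List.map_append]
      rfl

theorem solution_alt_eq_sup (A : List Int) (h : A ≠ []) :
    solution_alt A = (((Finset.range A.length).sup (pvF2 A) : ℕ) : ℤ) := by
  have hn : 0 < A.length := List.length_pos_iff.mpr h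
  unfold solution_alt
  dsimp only
  rw [show List.foldl (altStep A) [] A = List.foldl (altStep A) [] (A.take A.length) from by
        rw [List.take_length],
      alt_aux A A.length le_rfl, List.map_map]
  rw [show ((fun (t : ℤ × ℤ × ℤ) => t.2.2) ∘ fun j => ((((pvF0 A j : ℕ) : ℤ), ((pvF1 A j : ℕ) : ℤ), ((pvF2 A j : ℕ) : ℤ))))
      = fun j => ((pvF2 A j : ℕ) : ℤ) from rfl]
  exact list_max_getD A.length (pvF2 A) hn

-- ===== VERDICT (by name: the statement is the Claim_ definition above) =====
theorem solution_spec : Claim_equal_solution := by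
  intro A _ hpre
  unfold Spec_solution
  rw [solution_eq_sup A hpre, solution_alt_eq_sup A hpre]
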